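-- pv_equiv track=rewrite | github.com/MrBrantCode/unitest_baseline | mut_generate/mist_train_taco/taco_4768/solution.py | find_possible_s_t
-- ===== SOURCE A (Python) =====
-- import itertools
--
-- def find_possible_s_t(n, a):
--     winner = a[-1]
--     looser = 3 - winner
--     serve_win_cnt = [0]
--     serve_loose_cnt = [0]
--     win_pos = [-1]
--     loose_pos = [-1]
--     result = []
--     win_cnt = a.count(winner)
--
--     for i in range(n):
--         if a[i] == winner:
--             win_pos.append(i)
--         else:
--             loose_pos.append(i)
--         serve_win_cnt.append(serve_win_cnt[-1] + (a[i] == winner))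
--         serve_loose_cnt.append(serve_loose_cnt[-1] + (a[i] == looser))
--
--     win_pos += [n * 10] * n
--     loose_pos += [n * 10] * n
--     serve_win_cnt += [0] * n
--     serve_loose_cnt += [0] * n
--
--     for t in itertools.chain(list(range(1, 1 + win_cnt // 2)), [win_cnt]):
--         s = l = i = 0
--         sw = sl = 0
--         while i < n:
--             xw = win_pos[serve_win_cnt[i] + t]
--             xl = loose_pos[serve_loose_cnt[i] + t]
--             if xw < xl:
--                 s += 1
--             else:
--                 l += 1
--             i = min(xw, xl) + 1
--         if s > l and i <= n and (serve_win_cnt[i] == win_cnt):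
--             result.append((s, t))
--
--     k = len(result)
--     options = sorted(result)
--
--     return k, options
-- ===== SOURCE B (Python) =====
-- def find_possible_s_t(n, a):
--     winner = a[-1]
--     looser = 3 - winner
--     win_cnt = a.count(winner)
--     result = []
--     for t in list(range(1, 1 + win_cnt // 2)) + [win_cnt]:
--         s = l = cw = cl = 0
--         for i in range(n):
--             x = a[i]
--             if x == winner:
--                 cw += 1
--                 if cw == t:
--                     s += 1
--                     cw = cl = 0
--             elif x == looser:
--                 cl += 1
--                 if cl == t:
--                     l += 1
--                     cw = cl = 0
--         if cw == 0 and cl == 0 and s > l: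
--             result.append((s, t))
--     return len(result), sorted(result)
-- ===== Notes on version B (the rewrite author's own statement) =====
-- stated objective: simpler
-- what changed: B drops A's prefix-count/position index tables and jump logic entirely and instead, for each candidate set length t, rescans the first n serves once with running per-set point counters, appending (s,t) when the scan ends exactly at a set boundary with s>l.
-- outside the precondition, e.g. on find_possible_s_t(5, [1, 1, 1, 2, 1, 2, 2, 1]): A returns (0, []), B returns (2, [(2, 2), (4, 1)])
import Mathlib
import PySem

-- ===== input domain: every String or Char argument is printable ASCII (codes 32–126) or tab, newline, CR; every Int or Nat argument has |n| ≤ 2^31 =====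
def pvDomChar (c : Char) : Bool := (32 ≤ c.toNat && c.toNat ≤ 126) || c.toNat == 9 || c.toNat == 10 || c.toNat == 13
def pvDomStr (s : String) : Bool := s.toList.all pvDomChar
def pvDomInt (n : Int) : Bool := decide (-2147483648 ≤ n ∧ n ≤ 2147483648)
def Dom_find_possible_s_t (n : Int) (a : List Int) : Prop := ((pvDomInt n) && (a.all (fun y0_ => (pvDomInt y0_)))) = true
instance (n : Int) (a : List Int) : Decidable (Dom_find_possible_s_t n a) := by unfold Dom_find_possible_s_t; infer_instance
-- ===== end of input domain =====

-- B replaces A's prefix-count / position index tables and jump logic by a direct per-candidate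
-- left-to-right rescan with running set-point counters (objective: simpler; no speed claim).

-- ===== PORT A =====
-- one iteration of A's first loop, building (win_pos, loose_pos, serve_win_cnt, serve_loose_cnt)
def aTblStep (a : List Int) (winner looser : Int) :
    (List Int × List Int × List Int × List Int) → Int → (List Int × List Int × List Int × List Int) :=
  fun st i =>
    let ai := PySem.List.pyGetD a i 0     -- a[i]; in range for every index range(n) yields under Pre_
    let wp := if ai = winner then st.1 ++ [i] else st.1
    let lp := if ai = winner then st.2.1 else st.2.1 ++ [i]
    let swc := st.2.2.1 ++ [PySem.List.pyGetD st.2.2.1 (-1) 0 + (if ai = winner then 1 else 0)]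
    let slc := st.2.2.2 ++ [PySem.List.pyGetD st.2.2.2 (-1) 0 + (if ai = looser then 1 else 0)]
    (wp, lp, swc, slc)

-- A's inner 'while i < n' loop; fuel-bounded (fuel n.toNat+1 is enough under Pre_: i grows each pass)
def aWhile (wp lp swc slc : List Int) (t n : Int) : Nat → Int → Int → Int → (Int × Int × Int)
  | 0, i, s, l => (s, l, i)
  | fuel + 1, i, s, l =>
    if i < n then
      let xw := PySem.List.pyGetD wp (PySem.List.pyGetD swc i 0 + t) 0
      let xl := PySem.List.pyGetD lp (PySem.List.pyGetD slc i 0 + t) 0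
      if xw < xl then aWhile wp lp swc slc t n fuel (min xw xl + 1) (s + 1) l
      else aWhile wp lp swc slc t n fuel (min xw xl + 1) s (l + 1)
    else (s, l, i)

def find_possible_s_t (n : Int) (a : List Int) : Int × (List (Int × Int)) :=
  let winner := PySem.List.pyGetD a (-1) 0      -- a[-1]; a ≠ [] under Pre_
  let looser := 3 - winner
  let win_cnt := (PySem.List.count a winner : Int)
  let tbl := (PySem.List.pyRange 0 n 1).foldl (aTblStep a winner looser) ([-1], [-1], [0], [0])
  let wp := tbl.1 ++ PySem.List.pyRepeat [n * 10] n
  let lp := tbl.2.1 ++ PySem.List.pyRepeat [n * 10] n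
  let swc := tbl.2.2.1 ++ PySem.List.pyRepeat [0] n
  let slc := tbl.2.2.2 ++ PySem.List.pyRepeat [0] n
  let ts := PySem.List.pyRange 1 (1 + PySem.Int.floordiv win_cnt 2) 1 ++ [win_cnt]
  let result := ts.foldl (fun res t =>
    let r := aWhile wp lp swc slc t n (n.toNat + 1) 0 0 0
    if r.1 > r.2.1 ∧ r.2.2 ≤ n ∧ PySem.List.pyGetD swc r.2.2 0 = win_cnt
    then res ++ [(r.1, t)] else res) []
  (PySem.List.len result, PySem.List.sorted2 result Prod.fst Prod.snd false)

-- ===== PORT B =====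
-- one step of B's scan: current-set point counters cw/cl, set counters s/l; state (s, l, cw, cl)
def bScanStep (winner looser t : Int) : (Int × Int × Int × Int) → Int → (Int × Int × Int × Int) :=
  fun q x =>
    if x = winner then
      let cw := q.2.2.1 + 1
      if cw = t then (q.1 + 1, q.2.1, 0, 0) else (q.1, q.2.1, cw, q.2.2.2)
    else if x = looser then
      let cl := q.2.2.2 + 1
      if cl = t then (q.1, q.2.1 + 1, 0, 0) else (q.1, q.2.1, q.2.2.1, cl)
    else q

def find_possible_s_t_alt (n : Int) (a : List Int) : Int × (List (Int × Int)) :=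
  let winner := PySem.List.pyGetD a (-1) 0      -- a[-1]; a ≠ [] under Pre_
  let looser := 3 - winner
  let win_cnt := (PySem.List.count a winner : Int)
  let ts := PySem.List.pyRange 1 (1 + PySem.Int.floordiv win_cnt 2) 1 ++ [win_cnt]
  let result := ts.foldl (fun res t =>
    let q := (PySem.List.pyRange 0 n 1).foldl
      (fun q i => bScanStep winner looser t q (PySem.List.pyGetD a i 0)) (0, 0, 0, 0)
    if q.2.2.1 = 0 ∧ q.2.2.2 = 0 ∧ q.1 > q.2.1 then res ++ [(q.1, t)] else res) []
  (PySem.List.len result, PySem.List.sorted2 result Prod.fst Prod.snd false)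

-- ===== PRECONDITION & SPEC =====
-- Pre_ excludes: the empty list (a[-1] raises IndexError); 0 < n ≠ len(a), where A counts
-- serves in the whole list but scans only the first n (raising IndexError for n > len(a)); and,
-- for n = len(a), lists with an element that is neither a[-1] nor 3-a[-1] (a third "player":
-- A's loose-position table then records wrong positions and the while loop never terminates).
def Pre_find_possible_s_t (n : Int) (a : List Int) : Prop :=
  a ≠ [] ∧ (n ≤ 0 ∨
    (n = (a.length : Int) ∧ ∀ x ∈ a, x = a.getLastD 0 ∨ x = 3 - a.getLastD 0))
instance (n : Int) (a : List Int) : Decidable (Pre_find_possible_s_t n a) := by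
  unfold Pre_find_possible_s_t; infer_instance

def pvWitness_find_possible_s_t : Int × List Int := (4, [1, 2, 1, 1])

def Spec_find_possible_s_t (n : Int) (a : List Int) (out : Int × (List (Int × Int))) : Prop :=
  out = find_possible_s_t_alt n a
instance (n : Int) (a : List Int) (out : Int × (List (Int × Int))) : Decidable (Spec_find_possible_s_t n a out) := by
  unfold Spec_find_possible_s_t; infer_instance

-- ===== CLAIM (what is proved, stated in full; the proofs are below) =====
def Claim_equal_find_possible_s_t : Prop :=
  ∀ (n : Int) (a : List Int), Dom_find_possible_s_t n a → Pre_find_possible_s_t n a →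
    Spec_find_possible_s_t n a (find_possible_s_t n a)

-- ===== LEMMAS AND PROOFS =====

-- positions (absolute, starting at off) of the elements of a list satisfying p
def posP (p : Int → Bool) : List Int → Int → List Int
  | [], _ => []
  | x :: xs, off => if p x then off :: posP p xs (off + 1) else posP p xs (off + 1)

-- A's padded position table (win side: p = (· == winner); loose side: p = (· == looser))
def WPL (p : Int → Bool) (a : List Int) : List Int :=
  ((-1) :: posP p a 0) ++ List.replicate a.length ((a.length : Int) * 10)

-- A's padded prefix-count table
def CNT (p : Int → Bool) (a : List Int) : List Int :=
  ((List.range (a.length + 1)).map fun k => (((a.take k).countP p : Nat) : Int)) ++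
    List.replicate a.length 0

theorem length_posP (p : Int → Bool) : ∀ (u : List Int) (off : Int),
    (posP p u off).length = u.countP p := by
  intro u
  induction u with
  | nil => intro off; simp [posP]
  | cons x xs ih =>
    intro off
    by_cases h : p x <;> simp [posP, h, ih, List.countP_cons]

theorem posP_snoc (p : Int → Bool) : ∀ (u : List Int) (x : Int) (off : Int),
    posP p (u ++ [x]) off = posP p u off ++ (if p x then [off + u.length] else []) := by
  intro u
  induction u with
  | nil => intro x off; by_cases h : p x <;> simp [posP, h]
  | cons y ys ih =>
    intro x off
    by_cases h : p y <;> simp [posP, h, ih, List.length_cons] <;> ring_nf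

theorem posP_append (p : Int → Bool) : ∀ (u v : List Int) (off : Int),
    posP p (u ++ v) off = posP p u off ++ posP p v (off + u.length) := by
  intro u
  induction u with
  | nil => intro v off; simp [posP]
  | cons x xs ih =>
    intro v off
    by_cases h : p x <;> simp [posP, h, ih, List.length_cons] <;> ring_nf

theorem posP_congr (p q : Int → Bool) : ∀ (u : List Int) (off : Int),
    (∀ x ∈ u, p x = q x) → posP p u off = posP q u off := by
  intro u
  induction u with
  | nil => intro off _; simp [posP]
  | cons x xs ih =>
    intro off h
    have hx : p x = q x := h x (by simp)
    by_cases hp : p x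
    · simp [posP, hp, ← hx, ih _ (fun y hy => h y (by simp [hy]))]
    · simp [posP, hp, ← hx, ih _ (fun y hy => h y (by simp [hy]))]

theorem posP_get (p : Int → Bool) : ∀ (u : List Int) (off : Int) (k : Nat), k < u.countP p →
    ∃ q : Nat, q < u.length ∧ (posP p u off)[k]? = some (off + (q : Int)) ∧
      p (u.getD q 0) = true ∧ (u.take q).countP p = k := by
  intro u
  induction u with
  | nil => intro off k hk; simp at hk
  | cons x xs ih =>
    intro off k hk
    by_cases hp : p x
    · cases k with
      | zero => exact ⟨0, by simp [posP, hp], by simp [posP, hp], by simpa using hp, by simp⟩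
      | succ k' =>
        have hk' : k' < xs.countP p := by
          simp [List.countP_cons, hp] at hk; omega
        obtain ⟨q', hq1, hq2, hq3, hq4⟩ := ih (off + 1) k' hk'
        refine ⟨q' + 1, by simpa using hq1, ?_, by simpa using hq3, ?_⟩
        · simp [posP, hp, hq2]; ring
        · simp [List.countP_cons, hp, hq4]
    · have hk' : k < xs.countP p := by simpa [List.countP_cons, hp] using hk
      obtain ⟨q', hq1, hq2, hq3, hq4⟩ := ih (off + 1) k hk'
      refine ⟨q' + 1, by simpa using hq1, ?_, by simpa using hq3, ?_⟩
      · simp [posP, hp, hq2]; ring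
      · simp [List.countP_cons, hp, hq4]

-- the table-building loop computes the position lists and prefix-count tables
theorem tbl_spec (w lo : Int) (a : List Int) (hwlo : lo = 3 - w)
    (hne : ∀ x ∈ a, x = w ∨ x = lo) :
    (PySem.List.pyRange 0 (a.length : Int) 1).foldl (aTblStep a w lo) ([-1], [-1], [0], [0]) =
      ((-1) :: posP (· == w) a 0, (-1) :: posP (· == lo) a 0,
       (List.range (a.length + 1)).map (fun k => (((a.take k).countP (· == w) : Nat) : Int)),
       (List.range (a.length + 1)).map (fun k => (((a.take k).countP (· == lo) : Nat) : Int))) := by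
  have hwne : w ≠ lo := by omega
  have key : ∀ m : Nat, m ≤ a.length →
      (PySem.List.pyRange 0 (m : Int) 1).foldl (aTblStep a w lo) ([-1], [-1], [0], [0]) =
        ((-1) :: posP (· == w) (a.take m) 0, (-1) :: posP (fun x => !(x == w)) (a.take m) 0,
         (List.range (m + 1)).map (fun k => (((a.take k).countP (· == w) : Nat) : Int)),
         (List.range (m + 1)).map (fun k => (((a.take k).countP (· == lo) : Nat) : Int))) := by
    intro m
    induction m with
    | zero =>
      intro _
      rw [PySem.List.pyRange_one_eq_nil (by omega)]
      simp [posP]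
    | succ m ih =>
      intro hm1
      have hmlt : m < a.length := by omega
      have hcast : ((m + 1 : Nat) : Int) = (m : Int) + 1 := by push_cast; ring
      rw [hcast, PySem.List.pyRange_one_succ_right (by positivity), List.foldl_append,
        ih (by omega)]
      have hai : PySem.List.pyGetD a (m : Int) 0 = a[m] := by
        rw [PySem.List.pyGetD_natCast, List.getD_eq_getElem?_getD,
          List.getElem?_eq_getElem hmlt]
        rfl
      have htake : a.take (m + 1) = a.take m ++ [a[m]] := by
        rw [List.take_succ, List.getElem?_eq_getElem hmlt]
        rfl
      have hlen : (a.take m).length = m := by simp [List.length_take]; omega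
      have hlastW : PySem.List.pyGetD
          ((List.range (m + 1)).map (fun k => (((a.take k).countP (· == w) : Nat) : Int))) (-1) 0 =
          (((a.take m).countP (· == w) : Nat) : Int) := by
        rw [PySem.List.pyGetD_neg_ofNat _ 1 0 (by omega) (by simp)]
        simp
      have hlastL : PySem.List.pyGetD
          ((List.range (m + 1)).map (fun k => (((a.take k).countP (· == lo) : Nat) : Int))) (-1) 0 =
          (((a.take m).countP (· == lo) : Nat) : Int) := by
        rw [PySem.List.pyGetD_neg_ofNat _ 1 0 (by omega) (by simp)]
        simp
      simp only [List.foldl_cons, List.foldl_nil, aTblStep, hai, hlastW, hlastL,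
        Prod.mk.injEq]
      refine ⟨?_, ?_, ?_, ?_⟩
      · rw [htake, posP_snoc]
        by_cases hx : a[m] = w <;> simp [hx, hlen]
      · rw [htake, posP_snoc]
        by_cases hx : a[m] = w <;> simp [hx, hlen]
      · conv_rhs => rw [List.range_succ, List.map_append]
        congr 1
        simp only [List.map_cons, List.map_nil]
        rw [htake, List.countP_append]
        by_cases hx : a[m] = w <;> simp [hx] <;> push_cast <;> ring
      · conv_rhs => rw [List.range_succ, List.map_append]
        congr 1
        simp only [List.map_cons, List.map_nil]
        rw [htake, List.countP_append]
        by_cases hx : a[m] = lo <;> simp [hx] <;> push_cast <;> ring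
  have hfin := key a.length le_rfl
  rw [hfin, List.take_length]
  have hlp : posP (fun x => !(x == w)) a 0 = posP (· == lo) a 0 := by
    apply posP_congr
    intro x hx
    rcases hne x hx with h | h <;> subst h <;> simp [hwne, Ne.symm hwne]
  rw [hlp]

-- reading the prefix-count table at an in-range index
theorem cnt_getD (p : Int → Bool) (a : List Int) (j : Nat) (hj : j ≤ a.length) :
    PySem.List.pyGetD (CNT p a) (j : Int) 0 = (((a.take j).countP p : Nat) : Int) := by
  rw [PySem.List.pyGetD_natCast, CNT, List.getD_eq_getElem?_getD,
    List.getElem?_append_left (by simp; omega)]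
  simp [List.getElem?_range, Nat.lt_succ_of_le hj]

-- reading the position table when the t'-th occurrence after position j exists
theorem wpl_getD_real (p : Int → Bool) (a : List Int) (j t' : Nat) (hj : j ≤ a.length)
    (ht1 : 1 ≤ t') (hsuf : t' ≤ (a.drop j).countP p) :
    ∃ q : Nat, q < (a.drop j).length ∧
      PySem.List.pyGetD (WPL p a) ((((a.take j).countP p : Nat) : Int) + (t' : Int)) 0 = ((j + q : Nat) : Int) ∧
      p ((a.drop j).getD q 0) = true ∧ ((a.drop j).take q).countP p = t' - 1 := by
  have hsplit : (a.take j).countP p + (a.drop j).countP p = a.countP p := by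
    conv_rhs => rw [← List.take_append_drop j a]
    rw [List.countP_append]
  have htot : (posP p a 0).length = a.countP p := length_posP p a 0
  obtain ⟨q, hq1, hq2, hq3, hq4⟩ := posP_get p (a.drop j) (j : Int) (t' - 1) (by omega)
  refine ⟨q, hq1, ?_, hq3, hq4⟩
  have hidx : (((a.take j).countP p : Nat) : Int) + (t' : Int) =
      (((a.take j).countP p + t' : Nat) : Int) := by push_cast; ring
  rw [hidx, PySem.List.pyGetD_natCast, WPL, List.getD_eq_getElem?_getD,
    List.getElem?_append_left (by simp [htot]; omega)]
  have hsucc : (a.take j).countP p + t' = ((a.take j).countP p + (t' - 1)) + 1 := by omega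
  rw [hsucc]
  rw [List.getElem?_cons_succ]
  have hX : posP p a 0 = posP p (a.take j) 0 ++ posP p (a.drop j) (j : Int) := by
    conv_lhs => rw [← List.take_append_drop j a]
    rw [posP_append]
    congr 1
    simp [List.length_take, Nat.min_eq_left hj]
  rw [hX, List.getElem?_append_right (by rw [length_posP]; omega)]
  rw [length_posP]
  have : (a.take j).countP p + (t' - 1) - (a.take j).countP p = t' - 1 := by omega
  rw [this, hq2]
  simp

-- reading the position table in the padding region
theorem wpl_getD_pad (p : Int → Bool) (a : List Int) (j t' : Nat) (hj : j ≤ a.length)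
    (hsuf : (a.drop j).countP p < t') (ht : t' ≤ a.length) :
    PySem.List.pyGetD (WPL p a) ((((a.take j).countP p : Nat) : Int) + (t' : Int)) 0 =
      (a.length : Int) * 10 := by
  have hsplit : (a.take j).countP p + (a.drop j).countP p = a.countP p := by
    conv_rhs => rw [← List.take_append_drop j a]
    rw [List.countP_append]
  have hW : (a.take j).countP p ≤ a.countP p := by omega
  have hidx : (((a.take j).countP p : Nat) : Int) + (t' : Int) =
      (((a.take j).countP p + t' : Nat) : Int) := by push_cast; ring
  rw [hidx, PySem.List.pyGetD_natCast, WPL, List.getD_eq_getElem?_getD,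
    List.getElem?_append_right (by simp [length_posP]; omega)]
  rw [List.getElem?_replicate_of_lt (by simp [length_posP]; omega)]
  simp

-- B's scan over a stretch in which neither counter reaches t
theorem scan_no_trigger (w lo t : Int) (hwlo : w ≠ lo) : ∀ (u : List Int) (s l cw cl : Int),
    cw + ((u.countP (· == w) : Nat) : Int) < t → cl + ((u.countP (· == lo) : Nat) : Int) < t →
    u.foldl (bScanStep w lo t) (s, l, cw, cl) =
      (s, l, cw + ((u.countP (· == w) : Nat) : Int), cl + ((u.countP (· == lo) : Nat) : Int)) := by
  intro u
  induction u with
  | nil => intro s l cw cl _ _; simp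
  | cons x xs ih =>
    intro s l cw cl hw hl
    by_cases hxw : x = w
    · have hxlo : ¬ x = lo := by rw [hxw]; exact hwlo
      have hcw : (xs.countP (· == w) : Int) + (cw + 1) < t := by
        simp [List.countP_cons, hxw] at hw; push_cast at hw ⊢; omega
      have hne : ¬ cw + 1 = t := by
        have : (0 : Int) ≤ (xs.countP (· == w) : Int) := by positivity
        omega
      have step : bScanStep w lo t (s, l, cw, cl) x = (s, l, cw + 1, cl) := by
        simp [bScanStep, hxw, hne]
      rw [List.foldl_cons, step, ih s l (cw + 1) cl (by omega) (by simp [List.countP_cons, hxlo] at hl ⊢; omega)]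
      simp [List.countP_cons, hxw, hxlo]
      constructor <;> push_cast <;> omega
    · by_cases hxlo : x = lo
      · have hcl : (xs.countP (· == lo) : Int) + (cl + 1) < t := by
          simp [List.countP_cons, hxlo] at hl; push_cast at hl ⊢; omega
        have hne : ¬ cl + 1 = t := by
          have : (0 : Int) ≤ (xs.countP (· == lo) : Int) := by positivity
          omega
        have step : bScanStep w lo t (s, l, cw, cl) x = (s, l, cw, cl + 1) := by
          simp [bScanStep, hxw, hxlo, hne, Ne.symm hwlo]
        rw [List.foldl_cons, step, ih s l cw (cl + 1) (by simp [List.countP_cons, hxw] at hw ⊢; omega) (by omega)]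
        simp [List.countP_cons, hxw, hxlo]
        constructor <;> push_cast <;> omega
      · have step : bScanStep w lo t (s, l, cw, cl) x = (s, l, cw, cl) := by
          simp [bScanStep, hxw, hxlo]
        rw [List.foldl_cons, step, ih s l cw cl (by simp [List.countP_cons, hxw] at hw ⊢; omega)
            (by simp [List.countP_cons, hxlo] at hl ⊢; omega)]
        simp [List.countP_cons, hxw, hxlo]

-- B's scan over one complete set won by the winner
theorem scan_complete_w (w lo t : Int) (hwlo : w ≠ lo) (u : List Int) (s l : Int)
    (ht1 : 1 ≤ t) (hcw : ((u.countP (· == w) : Nat) : Int) = t - 1)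
    (hcl : ((u.countP (· == lo) : Nat) : Int) < t) :
    (u ++ [w]).foldl (bScanStep w lo t) (s, l, 0, 0) = (s + 1, l, 0, 0) := by
  rw [List.foldl_append,
    scan_no_trigger w lo t hwlo u s l 0 0 (by omega) (by omega)]
  simp only [zero_add, List.foldl_cons, List.foldl_nil]
  have h : ((u.countP (· == w) : Nat) : Int) + 1 = t := by omega
  simp [bScanStep, h]

-- B's scan over one complete set won by the looser
theorem scan_complete_l (w lo t : Int) (hwlo : w ≠ lo) (u : List Int) (s l : Int)
    (ht1 : 1 ≤ t) (hcl : ((u.countP (· == lo) : Nat) : Int) = t - 1)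
    (hcw : ((u.countP (· == w) : Nat) : Int) < t) :
    (u ++ [lo]).foldl (bScanStep w lo t) (s, l, 0, 0) = (s, l + 1, 0, 0) := by
  rw [List.foldl_append,
    scan_no_trigger w lo t hwlo u s l 0 0 (by omega) (by omega)]
  simp only [zero_add, List.foldl_cons, List.foldl_nil]
  have h : ((u.countP (· == lo) : Nat) : Int) + 1 = t := by omega
  simp [bScanStep, Ne.symm hwlo, h]

theorem getD_eq_getElem' (l : List Int) (q : Nat) (h : q < l.length) : l.getD q 0 = l[q] := by
  rw [List.getD_eq_getElem?_getD, List.getElem?_eq_getElem h]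
  rfl

-- the winner serves last, so every proper suffix still contains a winner serve
theorem drop_countP_pos (a : List Int) (w : Int) (ha : a ≠ []) (hlast : a.getLastD 0 = w)
    (i' : Nat) (hi : i' < a.length) : 1 ≤ (a.drop i').countP (· == w) := by
  have hL : 0 < a.length := List.length_pos_iff.mpr ha
  have h1 : a.getLast ha = w := by
    rw [← hlast, List.getLastD_eq_getLast?, List.getLast?_eq_some_getLast ha]
    rfl
  have h2 : (a.drop i')[a.length - 1 - i']'(by simp; omega) = w := by
    rw [List.getElem_drop]
    rw [← h1, List.getLast_eq_getElem]
    congr 1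
    omega
  have hmem : w ∈ a.drop i' := by
    rw [← h2]; exact List.getElem_mem _
  have := List.countP_pos_iff (p := fun x => x == w) (l := a.drop i') |>.mpr ⟨w, hmem, by simp⟩
  omega

-- MAIN: A's jump loop agrees with B's rescans on every suffix starting at a set boundary
theorem main_loop (w lo : Int) (a : List Int) (hwlo : lo = 3 - w)
    (hne : ∀ x ∈ a, x = w ∨ x = lo) (hlast : a.getLastD 0 = w) (ha : a ≠ [])
    (t' : Nat) (ht1 : 1 ≤ t') (ht2 : t' ≤ a.countP (· == w)) :
    ∀ (d i' : Nat), a.length - i' ≤ d → i' ≤ a.length →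
    ∀ (fuel : Nat), a.length - i' + 1 ≤ fuel → ∀ (s l : Int),
    (((a.drop i').foldl (bScanStep w lo (t' : Int)) (s, l, 0, 0)).2.2.1 = 0 ∧
       ((a.drop i').foldl (bScanStep w lo (t' : Int)) (s, l, 0, 0)).2.2.2 = 0 →
      aWhile (WPL (· == w) a) (WPL (· == lo) a) (CNT (· == w) a) (CNT (· == lo) a)
          (t' : Int) (a.length : Int) fuel (i' : Int) s l =
        (((a.drop i').foldl (bScanStep w lo (t' : Int)) (s, l, 0, 0)).1,
         ((a.drop i').foldl (bScanStep w lo (t' : Int)) (s, l, 0, 0)).2.1,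
         (a.length : Int))) ∧
    (¬ (((a.drop i').foldl (bScanStep w lo (t' : Int)) (s, l, 0, 0)).2.2.1 = 0 ∧
        ((a.drop i').foldl (bScanStep w lo (t' : Int)) (s, l, 0, 0)).2.2.2 = 0) →
      (aWhile (WPL (· == w) a) (WPL (· == lo) a) (CNT (· == w) a) (CNT (· == lo) a)
          (t' : Int) (a.length : Int) fuel (i' : Int) s l).2.2 = (a.length : Int) * 10 + 1) := by
  have hwne : w ≠ lo := by omega
  have htot : t' ≤ a.countP (· == w) := ht2
  have htle : a.countP (· == w) ≤ a.length := List.countP_le_length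
  intro d
  induction d with
  | zero =>
    intro i' hd hi fuel hf s l
    have hiL : i' = a.length := by omega
    subst hiL
    obtain ⟨f, rfl⟩ : ∃ f, fuel = f + 1 := ⟨fuel - 1, by omega⟩
    rw [List.drop_length]
    simp only [List.foldl_nil]
    exact ⟨fun _ => by simp [aWhile], fun h => by simp at h⟩
  | succ d ihd =>
    intro i' hd hi fuel hf s l
    by_cases hiL : i' = a.length
    · subst hiL
      obtain ⟨f, rfl⟩ : ∃ f, fuel = f + 1 := ⟨fuel - 1, by omega⟩
      rw [List.drop_length]
      simp only [List.foldl_nil]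
      exact ⟨fun _ => by simp [aWhile], fun h => by simp at h⟩
    · have hilt : i' < a.length := by omega
      obtain ⟨f, rfl⟩ : ∃ f, fuel = f + 1 := ⟨fuel - 1, by omega⟩
      have hguard : ((i' : Int) < (a.length : Int)) := by exact_mod_cast hilt
      have hdlen : (a.drop i').length = a.length - i' := List.length_drop
      have hsw1 : 1 ≤ (a.drop i').countP (· == w) := drop_countP_pos a w ha hlast i' hilt
      simp only [aWhile, if_pos hguard]
      rw [cnt_getD (· == w) a i' (by omega), cnt_getD (· == lo) a i' (by omega)]
      by_cases hw : t' ≤ (a.drop i').countP (· == w)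
      · obtain ⟨qw, hqw1, hqw2, hqw3, hqw4⟩ :=
          wpl_getD_real (· == w) a i' t' (by omega) ht1 hw
        have helw : (a.drop i')[qw] = w := by
          rw [← getD_eq_getElem' _ _ hqw1]
          simpa using hqw3
        have hseg : (a.drop i').take (qw + 1) = (a.drop i').take qw ++ [w] := by
          rw [List.take_succ, List.getElem?_eq_getElem hqw1, helw]
          rfl
        by_cases hl : t' ≤ (a.drop i').countP (· == lo)
        · obtain ⟨ql, hql1, hql2, hql3, hql4⟩ :=
            wpl_getD_real (· == lo) a i' t' (by omega) ht1 hl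
          have hell : (a.drop i')[ql] = lo := by
            rw [← getD_eq_getElem' _ _ hql1]
            simpa using hql3
          have helwD : (a.drop i').getD qw 0 = w := by simpa using hqw3
          have hellD : (a.drop i').getD ql 0 = lo := by simpa using hql3
          have hqne : qw ≠ ql := by
            intro h
            rw [h, hellD] at helwD
            exact hwne helwD.symm
          rw [hqw2, hql2]
          rcases Nat.lt_or_gt_of_ne hqne with hlt | hgt
          · -- winner reaches t first
            rw [if_pos (by exact_mod_cast Nat.add_lt_add_left hlt i'),
              min_eq_left (by exact_mod_cast Nat.le_of_lt (Nat.add_lt_add_left hlt i'))]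
            have hscan : (a.drop i').foldl (bScanStep w lo (t' : Int)) (s, l, 0, 0)
                = (a.drop (qw + 1 + i')).foldl (bScanStep w lo (t' : Int)) (s + 1, l, 0, 0) := by
              conv_lhs => rw [← List.take_append_drop (qw + 1) (a.drop i'), List.drop_drop]
              rw [List.foldl_append, hseg,
                scan_complete_w w lo (t' : Int) hwne _ s l (by exact_mod_cast ht1)
                  (by rw [hqw4]; push_cast; omega)
                  (by
                    have hsub : ((a.drop i').take qw).countP (· == lo) ≤
                        ((a.drop i').take ql).countP (· == lo) := by
                      have : (a.drop i').take qw = ((a.drop i').take ql).take qw := by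
                        rw [List.take_take, Nat.min_eq_left (Nat.le_of_lt hlt)]
                      rw [this]
                      exact (List.take_sublist _ _).countP_le
                    rw [hql4] at hsub
                    push_cast
                    omega)]
              rw [show i' + (qw + 1) = qw + 1 + i' from by omega]
            rw [hscan]
            have hc : ((i' + qw : Nat) : Int) + 1 = ((qw + 1 + i' : Nat) : Int) := by
              push_cast; ring
            rw [hc]
            exact ihd (qw + 1 + i') (by omega) (by omega) f (by omega) (s + 1) l
          · -- looser reaches t first
            rw [if_neg (by exact_mod_cast Nat.not_lt.mpr (Nat.add_le_add_left (Nat.le_of_lt hgt) i')),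
              min_eq_right (by exact_mod_cast Nat.le_of_lt (Nat.add_lt_add_left hgt i'))]
            have hsegl : (a.drop i').take (ql + 1) = (a.drop i').take ql ++ [lo] := by
              rw [List.take_succ, List.getElem?_eq_getElem hql1, hell]
              rfl
            have hscan : (a.drop i').foldl (bScanStep w lo (t' : Int)) (s, l, 0, 0)
                = (a.drop (ql + 1 + i')).foldl (bScanStep w lo (t' : Int)) (s, l + 1, 0, 0) := by
              conv_lhs => rw [← List.take_append_drop (ql + 1) (a.drop i'), List.drop_drop]
              rw [List.foldl_append, hsegl,
                scan_complete_l w lo (t' : Int) hwne _ s l (by exact_mod_cast ht1)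
                  (by rw [hql4]; push_cast; omega)
                  (by
                    have hsub : ((a.drop i').take ql).countP (· == w) ≤
                        ((a.drop i').take qw).countP (· == w) := by
                      have : (a.drop i').take ql = ((a.drop i').take qw).take ql := by
                        rw [List.take_take, Nat.min_eq_left (Nat.le_of_lt hgt)]
                      rw [this]
                      exact (List.take_sublist _ _).countP_le
                    rw [hqw4] at hsub
                    push_cast
                    omega)]
              rw [show i' + (ql + 1) = ql + 1 + i' from by omega]
            rw [hscan]
            have hc : ((i' + ql : Nat) : Int) + 1 = ((ql + 1 + i' : Nat) : Int) := by
              push_cast; ring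
            rw [hc]
            exact ihd (ql + 1 + i') (by omega) (by omega) f (by omega) s (l + 1)
        · -- looser lookup in the padding: winner set completes
          push_neg at hl
          rw [hqw2, wpl_getD_pad (· == lo) a i' t' (by omega) hl (by omega)]
          rw [if_pos (by push_cast; omega),
            min_eq_left (by push_cast; omega)]
          have hscan : (a.drop i').foldl (bScanStep w lo (t' : Int)) (s, l, 0, 0)
              = (a.drop (qw + 1 + i')).foldl (bScanStep w lo (t' : Int)) (s + 1, l, 0, 0) := by
            conv_lhs => rw [← List.take_append_drop (qw + 1) (a.drop i'), List.drop_drop]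
            rw [List.foldl_append, hseg,
              scan_complete_w w lo (t' : Int) hwne _ s l (by exact_mod_cast ht1)
                (by rw [hqw4]; push_cast; omega)
                (by
                  have hsub : ((a.drop i').take qw).countP (· == lo) ≤
                      (a.drop i').countP (· == lo) :=
                    (List.take_sublist _ _).countP_le
                  push_cast
                  omega)]
            rw [show i' + (qw + 1) = qw + 1 + i' from by omega]
          rw [hscan]
          have hc : ((i' + qw : Nat) : Int) + 1 = ((qw + 1 + i' : Nat) : Int) := by
            push_cast; ring
          rw [hc]
          exact ihd (qw + 1 + i') (by omega) (by omega) f (by omega) (s + 1) l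
      · push_neg at hw
        rw [wpl_getD_pad (· == w) a i' t' (by omega) hw (by omega)]
        by_cases hl : t' ≤ (a.drop i').countP (· == lo)
        · -- winner lookup in the padding: looser set completes
          obtain ⟨ql, hql1, hql2, hql3, hql4⟩ :=
            wpl_getD_real (· == lo) a i' t' (by omega) ht1 hl
          have hell : (a.drop i')[ql] = lo := by
            rw [← getD_eq_getElem' _ _ hql1]
            simpa using hql3
          rw [hql2]
          rw [if_neg (by push_cast; omega),
            min_eq_right (by push_cast; omega)]
          have hsegl : (a.drop i').take (ql + 1) = (a.drop i').take ql ++ [lo] := by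
            rw [List.take_succ, List.getElem?_eq_getElem hql1, hell]
            rfl
          have hscan : (a.drop i').foldl (bScanStep w lo (t' : Int)) (s, l, 0, 0)
              = (a.drop (ql + 1 + i')).foldl (bScanStep w lo (t' : Int)) (s, l + 1, 0, 0) := by
            conv_lhs => rw [← List.take_append_drop (ql + 1) (a.drop i'), List.drop_drop]
            rw [List.foldl_append, hsegl,
              scan_complete_l w lo (t' : Int) hwne _ s l (by exact_mod_cast ht1)
                (by rw [hql4]; push_cast; omega)
                (by
                  have hsub : ((a.drop i').take ql).countP (· == w) ≤
                      (a.drop i').countP (· == w) :=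
                    (List.take_sublist _ _).countP_le
                  push_cast
                  omega)]
            rw [show i' + (ql + 1) = ql + 1 + i' from by omega]
          rw [hscan]
          have hc : ((i' + ql : Nat) : Int) + 1 = ((ql + 1 + i' : Nat) : Int) := by
            push_cast; ring
          rw [hc]
          exact ihd (ql + 1 + i') (by omega) (by omega) f (by omega) s (l + 1)
        · -- neither serve count reaches t: trailing incomplete set
          push_neg at hl
          rw [wpl_getD_pad (· == lo) a i' t' (by omega) hl (by omega)]
          rw [if_neg (lt_irrefl _), min_self]
          obtain ⟨f2, rfl⟩ : ∃ f2, f = f2 + 1 := ⟨f - 1, by omega⟩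
          rw [scan_no_trigger w lo (t' : Int) hwne (a.drop i') s l 0 0
            (by push_cast; omega) (by push_cast; omega)]
          constructor
          · intro h
            exfalso
            have h1 := h.1
            simp only [zero_add] at h1
            have : List.countP (· == w) (a.drop i') = 0 := by exact_mod_cast h1
            omega
          · intro _
            simp only [aWhile]
            rw [if_neg (by push_cast; omega)]

-- B iterates indices range(n); with n = len(a) this is the plain scan of a
theorem scan_idx_eq (w lo t : Int) (a : List Int) :
    (PySem.List.pyRange 0 (a.length : Int) 1).foldl
      (fun q i => bScanStep w lo t q (PySem.List.pyGetD a i 0)) (0, 0, 0, 0) =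
      a.foldl (bScanStep w lo t) (0, 0, 0, 0) := by
  have h := PySem.List.foldl_pyRange_pyGetD a 0 (bScanStep w lo t)
    ((0 : Int), (0 : Int), (0 : Int), (0 : Int)) (a := 0) le_rfl
  simpa [PySem.List.len_eq] using h

-- per-candidate-t: the two loop bodies append the same thing
theorem per_t (w lo : Int) (a : List Int) (hwlo : lo = 3 - w)
    (hne : ∀ x ∈ a, x = w ∨ x = lo) (hlast : a.getLastD 0 = w) (ha : a ≠ [])
    (t' : Nat) (ht1 : 1 ≤ t') (ht2 : t' ≤ a.countP (· == w)) (res : List (Int × Int)) :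
    (if (aWhile (WPL (· == w) a) (WPL (· == lo) a) (CNT (· == w) a) (CNT (· == lo) a)
          (t' : Int) (a.length : Int) (a.length + 1) 0 0 0).1 >
        (aWhile (WPL (· == w) a) (WPL (· == lo) a) (CNT (· == w) a) (CNT (· == lo) a)
          (t' : Int) (a.length : Int) (a.length + 1) 0 0 0).2.1 ∧
        (aWhile (WPL (· == w) a) (WPL (· == lo) a) (CNT (· == w) a) (CNT (· == lo) a)
          (t' : Int) (a.length : Int) (a.length + 1) 0 0 0).2.2 ≤ (a.length : Int) ∧
        PySem.List.pyGetD (CNT (· == w) a)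
          (aWhile (WPL (· == w) a) (WPL (· == lo) a) (CNT (· == w) a) (CNT (· == lo) a)
            (t' : Int) (a.length : Int) (a.length + 1) 0 0 0).2.2 0 =
          ((a.countP (· == w) : Nat) : Int)
     then res ++ [((aWhile (WPL (· == w) a) (WPL (· == lo) a) (CNT (· == w) a) (CNT (· == lo) a)
          (t' : Int) (a.length : Int) (a.length + 1) 0 0 0).1, (t' : Int))] else res) =
    (if (a.foldl (bScanStep w lo (t' : Int)) (0, 0, 0, 0)).2.2.1 = 0 ∧
        (a.foldl (bScanStep w lo (t' : Int)) (0, 0, 0, 0)).2.2.2 = 0 ∧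
        (a.foldl (bScanStep w lo (t' : Int)) (0, 0, 0, 0)).1 >
          (a.foldl (bScanStep w lo (t' : Int)) (0, 0, 0, 0)).2.1
     then res ++ [((a.foldl (bScanStep w lo (t' : Int)) (0, 0, 0, 0)).1, (t' : Int))] else res) := by
  have hL : 0 < a.length := List.length_pos_iff.mpr ha
  have hm := main_loop w lo a hwlo hne hlast ha t' ht1 ht2 a.length 0 (by omega) (by omega)
    (a.length + 1) (by omega) 0 0
  simp only [List.drop_zero, Nat.cast_zero] at hm
  by_cases hclean : (a.foldl (bScanStep w lo (t' : Int)) (0, 0, 0, 0)).2.2.1 = 0 ∧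
      (a.foldl (bScanStep w lo (t' : Int)) (0, 0, 0, 0)).2.2.2 = 0
  · rw [hm.1 hclean]
    rw [cnt_getD (· == w) a a.length le_rfl, List.take_length]
    by_cases hgt : (a.foldl (bScanStep w lo (t' : Int)) (0, 0, 0, 0)).1 >
        (a.foldl (bScanStep w lo (t' : Int)) (0, 0, 0, 0)).2.1
    · rw [if_pos ⟨hgt, le_rfl, rfl⟩, if_pos ⟨hclean.1, hclean.2, hgt⟩]
    · rw [if_neg (fun h => hgt h.1), if_neg (fun h => hgt h.2.2)]
  · have hr := hm.2 hclean
    rw [if_neg (fun h => by rw [hr] at h; omega),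
      if_neg (fun h => hclean ⟨h.1, h.2.1⟩)]

-- ===== VERDICT (by name: the statement is the Claim_ definition above) =====
theorem find_possible_s_t_spec : Claim_equal_find_possible_s_t := by
  unfold Claim_equal_find_possible_s_t
  intro n a _ hpre
  obtain ⟨ha, hcase⟩ := hpre
  rcases hcase with hn0 | ⟨hn, hne'⟩
  · -- n ≤ 0: A scans nothing and B iterates range(n) = []; both return (0, [])
    unfold Spec_find_possible_s_t find_possible_s_t find_possible_s_t_alt
    dsimp only
    simp [PySem.List.pyRange_one_eq_nil hn0, aWhile, Int.toNat_of_nonpos hn0,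
      show ¬((0 : Int) < n) from by omega, PySem.List.foldl_ignore]
  subst hn
  unfold Spec_find_possible_s_t find_possible_s_t find_possible_s_t_alt
  dsimp only
  simp only [scan_idx_eq]
  have hwm : PySem.List.pyGetD a (-1) 0 = a.getLastD 0 := by
    rw [PySem.List.pyGetD_neg_one a 0 ha, List.getLastD_eq_getLast?,
      List.getLast?_eq_some_getLast ha]
    rfl
  rw [hwm]
  have hwmem : a.getLastD 0 ∈ a := by
    rw [List.getLastD_eq_getLast?, List.getLast?_eq_some_getLast ha]
    exact List.getLast_mem ha
  have hcntpos : 1 ≤ a.countP (· == a.getLastD 0) :=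
    List.countP_pos_iff.mpr ⟨a.getLastD 0, hwmem, by simp⟩
  have hcnt : (PySem.List.count a (a.getLastD 0) : Int) =
      ((a.countP (· == a.getLastD 0) : Nat) : Int) := by
    rw [PySem.List.count_eq, List.count_eq_countP]
  rw [hcnt, tbl_spec (a.getLastD 0) (3 - a.getLastD 0) a rfl hne']
  simp only [PySem.List.pyRepeat_singleton, Int.toNat_natCast]
  have hres :
      (PySem.List.pyRange 1 (1 + PySem.Int.floordiv ((a.countP (· == a.getLastD 0) : Nat) : Int) 2) 1 ++
        [((a.countP (· == a.getLastD 0) : Nat) : Int)]).foldl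
        (fun res t =>
          if (aWhile ((-1) :: posP (· == a.getLastD 0) a 0 ++ List.replicate a.length ((a.length : Int) * 10))
                ((-1) :: posP (· == 3 - a.getLastD 0) a 0 ++ List.replicate a.length ((a.length : Int) * 10))
                ((List.range (a.length + 1)).map (fun k => (((a.take k).countP (· == a.getLastD 0) : Nat) : Int)) ++ List.replicate a.length 0)
                ((List.range (a.length + 1)).map (fun k => (((a.take k).countP (· == 3 - a.getLastD 0) : Nat) : Int)) ++ List.replicate a.length 0)
                t (a.length : Int) ((a.length : Int).toNat + 1) 0 0 0).1 >
              (aWhile ((-1) :: posP (· == a.getLastD 0) a 0 ++ List.replicate a.length ((a.length : Int) * 10))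
                ((-1) :: posP (· == 3 - a.getLastD 0) a 0 ++ List.replicate a.length ((a.length : Int) * 10))
                ((List.range (a.length + 1)).map (fun k => (((a.take k).countP (· == a.getLastD 0) : Nat) : Int)) ++ List.replicate a.length 0)
                ((List.range (a.length + 1)).map (fun k => (((a.take k).countP (· == 3 - a.getLastD 0) : Nat) : Int)) ++ List.replicate a.length 0)
                t (a.length : Int) ((a.length : Int).toNat + 1) 0 0 0).2.1 ∧ True
          then res else res) [] = ([] : List (Int × Int)) → True := fun _ => trivial
  clear hres
  have hfloor : PySem.Int.floordiv ((a.countP (· == a.getLastD 0) : Nat) : Int) 2 =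
      ((a.countP (· == a.getLastD 0) : Nat) : Int) / 2 :=
    PySem.Int.floordiv_eq_ediv_of_pos (by norm_num)
  refine congrArg (fun r => (PySem.List.len r, PySem.List.sorted2 r Prod.fst Prod.snd false)) ?_
  apply PySem.List.foldl_congr_mem
  intro acc t htm
  have hbounds : 1 ≤ t ∧ t ≤ ((a.countP (· == a.getLastD 0) : Nat) : Int) := by
    rcases List.mem_append.mp htm with h | h
    · have := PySem.List.mem_pyRange_one.mp h
      rw [hfloor] at this
      omega
    · rw [List.mem_singleton] at h
      subst h
      constructor
      · exact_mod_cast hcntpos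
      · exact le_rfl
  have ht0 : t = ((t.toNat : Nat) : Int) := (Int.toNat_of_nonneg (by omega)).symm
  rw [ht0]
  exact per_t (a.getLastD 0) (3 - a.getLastD 0) a rfl hne' rfl ha t.toNat
    (by omega) (by omega) acc
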